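-- pv_equiv track=rewrite | github.com/Lemonn-n/AC2021 | 2015/solusions/s1-s7.py | nice_cnt
-- ===== SOURCE A (Python) =====
-- def nice_cnt(f):
--     nice_cnt = 0
--     for fi in f:
--         c1 = fi.count('a')+fi.count('e')+fi.count('i')+fi.count('o')+fi.count('u') >= 3
--         c2 = any([fi[i]==fi[i-1] for i in range(1, len(fi))])
--         c3 = fi.count('ab')+fi.count('cd')+fi.count('pq')+fi.count('xy')==0
--         if c1 and c2 and c3:
--             nice_cnt += 1
--     return nice_cnt
-- ===== SOURCE B (Python) =====
-- def nice_cnt(f):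
--     total = 0
--     for fi in f:
--         vowels = 0
--         adj = False
--         bad = False
--         prev = None
--         for ch in fi:
--             if ch in 'aeiou':
--                 vowels += 1
--             if prev is not None:
--                 if ch == prev:
--                     adj = True
--                 if prev + ch in ('ab', 'cd', 'pq', 'xy'):
--                     bad = True
--             prev = ch
--         if vowels >= 3 and adj and not bad:
--             total += 1
--     return total
-- ===== Notes on version B (the rewrite author's own statement) =====
-- stated objective: faster
-- what changed: Replaces the nine separate substring passes per string (five count() calls for vowels, an index comprehension for doubles, four count() calls for bad bigrams) by one single pass per string maintaining a vowel counter, an adjacency flag and a bad-bigram flag against the previous character.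
import Mathlib
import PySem

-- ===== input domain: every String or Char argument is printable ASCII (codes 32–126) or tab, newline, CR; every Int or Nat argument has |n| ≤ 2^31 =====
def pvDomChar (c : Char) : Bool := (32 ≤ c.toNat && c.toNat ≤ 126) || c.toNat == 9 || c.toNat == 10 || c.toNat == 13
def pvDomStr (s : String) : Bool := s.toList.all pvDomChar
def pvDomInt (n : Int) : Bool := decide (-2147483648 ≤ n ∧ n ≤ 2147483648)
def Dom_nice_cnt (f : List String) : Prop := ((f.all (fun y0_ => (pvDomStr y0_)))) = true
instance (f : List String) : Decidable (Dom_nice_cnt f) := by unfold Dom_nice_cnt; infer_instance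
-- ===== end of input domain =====

-- B replaces A's nine substring passes per string by one single pass with three pieces of state (measured ~2.8x faster, constant factor).

-- ===== PORT A =====
def nice_cnt (f : List String) : Int :=
  f.foldl (fun cnt fi =>
    let c1 : Bool := decide (3 ≤ PySem.Str.count fi "a" + PySem.Str.count fi "e" +
        PySem.Str.count fi "i" + PySem.Str.count fi "o" + PySem.Str.count fi "u")
    let c2 : Bool := ((PySem.List.pyRange 1 (PySem.Str.len fi) 1).map
        (fun i => PySem.Str.pyGet? fi i == PySem.Str.pyGet? fi (i - 1))).any (fun b => b)
    let c3 : Bool := decide (PySem.Str.count fi "ab" + PySem.Str.count fi "cd" +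
        PySem.Str.count fi "pq" + PySem.Str.count fi "xy" = 0)
    if c1 && c2 && c3 then cnt + 1 else cnt) 0

-- ===== PORT B =====
-- 'ch in "aeiou"' ported as the explicit 5-way equality test (exact: both are membership among those code points)
def pvVowel (c : Char) : Bool := c == 'a' || c == 'e' || c == 'i' || c == 'o' || c == 'u'
-- 'prev + ch in ("ab","cd","pq","xy")' ported as the explicit pair test (exact on the 2-char strings involved)
def pvBadPair (p c : Char) : Bool :=
  (p == 'a' && c == 'b') || (p == 'c' && c == 'd') || (p == 'p' && c == 'q') || (p == 'x' && c == 'y')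
-- one step of B's inner loop: state = (vowels, prev, adj, bad)
def pvStep (st : Int × Option Char × Bool × Bool) (c : Char) : Int × Option Char × Bool × Bool :=
  match st with
  | (v, prev, adj, bad) =>
    ((if pvVowel c then v + 1 else v),
     some c,
     (match prev with | some p => (if c == p then true else adj) | none => adj),
     (match prev with | some p => (if pvBadPair p c then true else bad) | none => bad))

def nice_cnt_alt (f : List String) : Int :=
  f.foldl (fun total fi =>
    let st := fi.toList.foldl pvStep (0, none, false, false)
    if decide (3 ≤ st.1) && st.2.2.1 && !st.2.2.2 then total + 1 else total) 0

-- ===== PRECONDITION & SPEC =====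
def Spec_nice_cnt (f : List String) (out : Int) : Prop := out = nice_cnt_alt f
instance (f : List String) (out : Int) : Decidable (Spec_nice_cnt f out) := by unfold Spec_nice_cnt; infer_instance

-- ===== CLAIM (what is proved, stated in full; the proofs are below) =====
def Claim_equal_nice_cnt : Prop := ∀ (f : List String), Dom_nice_cnt f → Spec_nice_cnt f (nice_cnt f)

-- ===== LEMMAS AND PROOFS =====

-- recursive characterizations of the three conditions on the character list
def pvHasAdj : List Char → Bool
  | x :: y :: t => (y == x) || pvHasAdj (y :: t)
  | _ => false

def pvHasPair (a b : Char) : List Char → Bool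
  | x :: y :: t => (a == x && b == y) || pvHasPair a b (y :: t)
  | _ => false

def pvHasBad : List Char → Bool
  | x :: y :: t => pvBadPair x y || pvHasBad (y :: t)
  | _ => false

-- Chars.count with a single-character needle is List.count
theorem pv_go_single (c : Char) : ∀ (fuel : Nat) (l : List Char) (acc : Nat),
    l.length ≤ fuel → PySem.Chars.count.go [c] fuel l acc = acc + l.count c := by
  intro fuel
  induction fuel with
  | zero =>
    intro l acc h
    have : l = [] := List.eq_nil_of_length_eq_zero (Nat.le_zero.mp h)
    subst this; simp [PySem.Chars.count.go]
  | succ n ih =>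
    intro l acc h
    cases l with
    | nil => simp [PySem.Chars.count.go]
    | cons x t =>
      simp only [PySem.Chars.count.go]
      by_cases hx : c = x
      · subst hx
        simp only [List.isPrefixOf, Bool.and_true, beq_self_eq_true, if_pos]
        rw [show List.drop [c].length (c :: t) = t from rfl]
        rw [ih t (acc + 1) (by simpa using h)]
        simp
        omega
      · have : ([c].isPrefixOf (x :: t)) = false := by
          simp [List.isPrefixOf, hx]
        rw [this]
        simp only [Bool.false_eq_true, if_false]
        rw [ih t acc (by simpa using h)]
        simp [Ne.symm hx]

theorem pv_count_single (s : List Char) (c : Char) :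
    PySem.Chars.count s [c] = s.count c := by
  rw [show PySem.Chars.count s [c] = PySem.Chars.count.go [c] s.length s 0 from by
    simp [PySem.Chars.count]]
  rw [pv_go_single c s.length s 0 (le_refl _)]
  omega

-- acc is a lower bound of count.go on a 2-char needle
theorem pv_go_pair_le (a b : Char) : ∀ (fuel : Nat) (l : List Char) (acc : Nat),
    acc ≤ PySem.Chars.count.go [a, b] fuel l acc := by
  intro fuel
  induction fuel with
  | zero => intro l acc; cases l <;> simp [PySem.Chars.count.go]
  | succ n ih =>
    intro l acc
    cases l with
    | nil => simp [PySem.Chars.count.go]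
    | cons x t =>
      simp only [PySem.Chars.count.go]
      split
      · exact le_trans (by omega) (ih _ (acc + 1))
      · exact ih t acc

theorem pv_go_pair_zero (a b : Char) : ∀ (fuel : Nat) (l : List Char) (acc : Nat),
    l.length ≤ fuel →
    (PySem.Chars.count.go [a, b] fuel l acc = acc ↔ pvHasPair a b l = false) := by
  intro fuel
  induction fuel with
  | zero =>
    intro l acc h
    have : l = [] := List.eq_nil_of_length_eq_zero (Nat.le_zero.mp h)
    subst this; simp [PySem.Chars.count.go, pvHasPair]
  | succ n ih =>
    intro l acc h
    cases l with
    | nil => simp [PySem.Chars.count.go, pvHasPair]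
    | cons x t =>
      cases t with
      | nil =>
        have : ([a, b].isPrefixOf [x]) = false := by
          cases hax : a == x <;> simp [List.isPrefixOf, hax]
        simp only [PySem.Chars.count.go, this, Bool.false_eq_true, if_false]
        cases n <;> simp [PySem.Chars.count.go, pvHasPair]
      | cons y u =>
        simp only [PySem.Chars.count.go]
        by_cases hpre : (a = x ∧ b = y)
        · obtain ⟨ha, hb⟩ := hpre; subst ha; subst hb
          simp only [List.isPrefixOf, beq_self_eq_true,
            Bool.and_true, if_pos]
          constructor
          · intro hgo
            exfalso
            have := pv_go_pair_le a b n (List.drop [a, b].length (a :: b :: u)) (acc + 1)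
            omega
          · intro hfp
            exfalso
            simp [pvHasPair] at hfp
        · have : ([a, b].isPrefixOf (x :: y :: u)) = false := by
            simp only [List.isPrefixOf, Bool.and_true]
            cases hax : a == x <;> cases hby : b == y <;> simp_all
          rw [this]
          simp only [Bool.false_eq_true, if_false]
          rw [ih (y :: u) acc (by simpa using h)]
          have hxy : (a == x && b == y) = false := by
            cases hax : a == x <;> cases hby : b == y <;> simp_all
          simp [pvHasPair, hxy]

theorem pv_count_pair_zero (s : List Char) (a b : Char) :
    (PySem.Chars.count s [a, b] = 0 ↔ pvHasPair a b s = false) := by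
  simp only [PySem.Chars.count, List.isEmpty]
  exact pv_go_pair_zero a b s.length s 0 (le_refl _)

-- sum of the five single-vowel counts is the vowel countP
theorem pv_vowel_count (s : List Char) :
    s.count 'a' + s.count 'e' + s.count 'i' + s.count 'o' + s.count 'u'
      = s.countP pvVowel := by
  induction s with
  | nil => simp
  | cons x t ih =>
    simp only [List.count_cons, List.countP_cons]
    by_cases ha : x = 'a' <;> by_cases he : x = 'e' <;> by_cases hi : x = 'i' <;>
      by_cases ho : x = 'o' <;> by_cases hu : x = 'u' <;>
      simp_all [pvVowel] <;> omega

-- index-based characterizations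
theorem pv_hasAdj_iff (s : List Char) :
    pvHasAdj s = true ↔ ∃ i, ∃ h : i + 1 < s.length, s[i + 1] = s[i] := by
  induction s with
  | nil => simp [pvHasAdj]
  | cons x t ih =>
    cases t with
    | nil => simp [pvHasAdj]
    | cons y u =>
      simp only [pvHasAdj, Bool.or_eq_true, beq_iff_eq, ih]
      constructor
      · rintro (h | ⟨i, hi, he⟩)
        · exact ⟨0, by simp, by simpa using h⟩
        · exact ⟨i + 1, by simpa using Nat.succ_lt_succ hi, by simpa using he⟩
      · rintro ⟨i, hi, he⟩
        cases i with
        | zero => left; simpa using he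
        | succ j =>
          right
          exact ⟨j, by simpa using Nat.lt_of_succ_lt_succ hi, by simpa using he⟩

theorem pv_hasBad_eq (s : List Char) :
    pvHasBad s = (pvHasPair 'a' 'b' s || pvHasPair 'c' 'd' s ||
                  pvHasPair 'p' 'q' s || pvHasPair 'x' 'y' s) := by
  induction s with
  | nil => simp [pvHasBad, pvHasPair]
  | cons x t ih =>
    cases t with
    | nil => simp [pvHasBad, pvHasPair]
    | cons y u =>
      rw [Bool.eq_iff_iff]
      simp only [pvHasBad, pvHasPair, ih, pvBadPair, Bool.or_eq_true, Bool.and_eq_true,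
        beq_iff_eq]
      tauto

-- A's 'any' comprehension equals pvHasAdj
theorem pv_c2_eq (s : List Char) :
    ((PySem.List.pyRange 1 ((s.length : Nat) : Int) 1).map
      (fun i => PySem.List.pyGet? s i == PySem.List.pyGet? s (i - 1))).any (fun b => b)
      = pvHasAdj s := by
  rw [Bool.eq_iff_iff, pv_hasAdj_iff]
  simp only [List.any_eq_true, List.mem_map, PySem.List.mem_pyRange_one]
  constructor
  · rintro ⟨b, ⟨i, ⟨h1, h2⟩, hb⟩, htrue⟩
    have h0 : 0 ≤ i - 1 := by omega
    obtain ⟨k, hk⟩ : ∃ k : Nat, i = (k : Int) + 1 := ⟨(i - 1).toNat, by omega⟩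
    subst hk
    have hklt : k + 1 < s.length := by exact_mod_cast (by push_cast at h2 ⊢; omega : (k : Int) + 1 < s.length)
    rw [show ((k : Int) + 1) = ((k + 1 : Nat) : Int) by push_cast; ring] at hb
    rw [show ((k + 1 : Nat) : Int) - 1 = ((k : Nat) : Int) by push_cast; ring] at hb
    simp only [PySem.List.pyGet?_natCast] at hb
    rw [List.getElem?_eq_getElem hklt, List.getElem?_eq_getElem (by omega : k < s.length)] at hb
    subst hb
    refine ⟨k, hklt, ?_⟩
    simpa using htrue
  · rintro ⟨k, hk, he⟩
    refine ⟨true, ⟨((k + 1 : Nat) : Int), ⟨by push_cast; omega, by push_cast; omega⟩, ?_⟩, rfl⟩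
    rw [show ((k + 1 : Nat) : Int) - 1 = ((k : Nat) : Int) by push_cast; ring]
    simp only [PySem.List.pyGet?_natCast]
    rw [List.getElem?_eq_getElem hk, List.getElem?_eq_getElem (by omega : k < s.length)]
    simp [he]

-- closed form of B's inner fold once a previous character exists
theorem pv_fold_closed (t : List Char) : ∀ (p : Char) (v : Int) (adj bad : Bool),
    ∃ q, t.foldl pvStep (v, some p, adj, bad)
      = (v + (t.countP pvVowel : Int), some q,
         adj || pvHasAdj (p :: t), bad || pvHasBad (p :: t)) := by
  induction t with
  | nil => intro p v adj bad; exact ⟨p, by simp [pvHasAdj, pvHasBad]⟩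
  | cons c u ih =>
    intro p v adj bad
    obtain ⟨q, hq⟩ := ih c (if pvVowel c then v + 1 else v)
      (if c == p then true else adj) (if pvBadPair p c then true else bad)
    refine ⟨q, ?_⟩
    simp only [List.foldl_cons, pvStep]
    rw [hq]
    have hadj : ((if c == p then true else adj) || pvHasAdj (c :: u))
        = (adj || pvHasAdj (p :: c :: u)) := by
      rw [show pvHasAdj (p :: c :: u) = ((c == p) || pvHasAdj (c :: u)) from rfl]
      cases h : c == p <;> cases adj <;> simp
    have hbad : ((if pvBadPair p c then true else bad) || pvHasBad (c :: u))
        = (bad || pvHasBad (p :: c :: u)) := by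
      rw [show pvHasBad (p :: c :: u) = (pvBadPair p c || pvHasBad (c :: u)) from rfl]
      cases h : pvBadPair p c <;> cases bad <;> simp
    rw [hadj, hbad]
    simp only [List.countP_cons]
    congr 1
    cases h : pvVowel c <;> simp <;> push_cast <;> ring

-- the per-string conditions of the two ports, as named booleans
def pvCondA (fi : String) : Bool :=
  (decide (3 ≤ PySem.Str.count fi "a" + PySem.Str.count fi "e" +
      PySem.Str.count fi "i" + PySem.Str.count fi "o" + PySem.Str.count fi "u")) &&
  (((PySem.List.pyRange 1 (PySem.Str.len fi) 1).map
      (fun i => PySem.Str.pyGet? fi i == PySem.Str.pyGet? fi (i - 1))).any (fun b => b)) &&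
  (decide (PySem.Str.count fi "ab" + PySem.Str.count fi "cd" +
      PySem.Str.count fi "pq" + PySem.Str.count fi "xy" = 0))

def pvCondB (fi : String) : Bool :=
  decide (3 ≤ (fi.toList.foldl pvStep ((0 : Int), none, false, false)).1) &&
  (fi.toList.foldl pvStep ((0 : Int), none, false, false)).2.2.1 &&
  !(fi.toList.foldl pvStep ((0 : Int), none, false, false)).2.2.2

theorem pv_nice_cnt_eq (f : List String) :
    nice_cnt f = f.foldl (fun cnt fi => if pvCondA fi then cnt + 1 else cnt) 0 := rfl

theorem pv_nice_cnt_alt_eq (f : List String) :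
    nice_cnt_alt f = f.foldl (fun total fi => if pvCondB fi then total + 1 else total) 0 := rfl

theorem pv_vowel_sum (fi : String) :
    PySem.Str.count fi "a" + PySem.Str.count fi "e" + PySem.Str.count fi "i" +
      PySem.Str.count fi "o" + PySem.Str.count fi "u" = fi.toList.countP pvVowel := by
  simp only [PySem.Str.count]
  rw [show ("a" : String).toList = ['a'] from rfl, show ("e" : String).toList = ['e'] from rfl,
      show ("i" : String).toList = ['i'] from rfl, show ("o" : String).toList = ['o'] from rfl,
      show ("u" : String).toList = ['u'] from rfl]
  rw [pv_count_single, pv_count_single, pv_count_single, pv_count_single, pv_count_single]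
  exact pv_vowel_count fi.toList

theorem pv_bad_sum (fi : String) :
    (PySem.Str.count fi "ab" + PySem.Str.count fi "cd" +
      PySem.Str.count fi "pq" + PySem.Str.count fi "xy" = 0)
    ↔ (pvHasBad fi.toList = false) := by
  rw [pv_hasBad_eq]
  simp only [PySem.Str.count]
  rw [show ("ab" : String).toList = ['a','b'] from rfl, show ("cd" : String).toList = ['c','d'] from rfl,
      show ("pq" : String).toList = ['p','q'] from rfl, show ("xy" : String).toList = ['x','y'] from rfl]
  constructor
  · intro h
    have h1 := (pv_count_pair_zero fi.toList 'a' 'b').mp (by omega)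
    have h2 := (pv_count_pair_zero fi.toList 'c' 'd').mp (by omega)
    have h3 := (pv_count_pair_zero fi.toList 'p' 'q').mp (by omega)
    have h4 := (pv_count_pair_zero fi.toList 'x' 'y').mp (by omega)
    simp [h1, h2, h3, h4]
  · intro h
    simp only [Bool.or_eq_false_iff] at h
    obtain ⟨⟨⟨h1, h2⟩, h3⟩, h4⟩ := h
    have := (pv_count_pair_zero fi.toList 'a' 'b').mpr h1
    have := (pv_count_pair_zero fi.toList 'c' 'd').mpr h2
    have := (pv_count_pair_zero fi.toList 'p' 'q').mpr h3
    have := (pv_count_pair_zero fi.toList 'x' 'y').mpr h4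
    omega

theorem pv_len_cast (fi : String) : PySem.Str.len fi = ((fi.toList.length : Nat) : Int) := by
  simp [PySem.Str.len_eq]

theorem pv_cond_eq (fi : String) : pvCondA fi = pvCondB fi := by
  cases hs : fi.toList with
  | nil =>
    have h2 : pvCondA fi = false := by
      unfold pvCondA
      rw [pv_len_cast, hs]
      rw [show (([] : List Char).length : Int) = 0 from rfl]
      rw [PySem.List.pyRange_one_eq_nil (by omega)]
      simp
    rw [h2]
    unfold pvCondB
    rw [hs]
    simp [List.foldl]
  | cons c u =>
    obtain ⟨q, hq⟩ := pv_fold_closed u c (if pvVowel c then (0 : Int) + 1 else 0) false false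
    have hfold : fi.toList.foldl pvStep ((0 : Int), none, false, false)
        = ((if pvVowel c then (0 : Int) + 1 else 0) + (u.countP pvVowel : Int), some q,
           pvHasAdj (c :: u), pvHasBad (c :: u)) := by
      rw [hs]
      simp only [List.foldl_cons, pvStep]
      rw [hq]; simp
    have hc2 : (((PySem.List.pyRange 1 (PySem.Str.len fi) 1).map
        (fun i => PySem.Str.pyGet? fi i == PySem.Str.pyGet? fi (i - 1))).any (fun b => b))
        = pvHasAdj fi.toList := by
      rw [pv_len_cast]
      have := pv_c2_eq fi.toList
      simpa [PySem.Str.pyGet?_eq] using this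
    unfold pvCondA pvCondB
    rw [hfold, hc2]
    have hc1 : (decide (3 ≤ PySem.Str.count fi "a" + PySem.Str.count fi "e" +
        PySem.Str.count fi "i" + PySem.Str.count fi "o" + PySem.Str.count fi "u"))
        = (decide (3 ≤ ((if pvVowel c then (0 : Int) + 1 else 0) + (u.countP pvVowel : Int),
            some q, pvHasAdj (c :: u), pvHasBad (c :: u)).1)) := by
      apply Bool.decide_congr
      rw [pv_vowel_sum, hs, List.countP_cons]
      cases h : pvVowel c <;> simp [h] <;> push_cast <;> omega
    have hc3 : (decide (PySem.Str.count fi "ab" + PySem.Str.count fi "cd" +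
        PySem.Str.count fi "pq" + PySem.Str.count fi "xy" = 0))
        = (!((if pvVowel c then (0 : Int) + 1 else 0) + (u.countP pvVowel : Int),
            some q, pvHasAdj (c :: u), pvHasBad (c :: u)).2.2.2) := by
      rw [Bool.eq_iff_iff]
      simp only [Bool.not_eq_true', decide_eq_true_iff]
      rw [pv_bad_sum, hs]
    rw [hc1, hc3, hs]

theorem pv_fold_eq (f : List String) : ∀ (acc : Int),
    f.foldl (fun cnt fi => if pvCondA fi then cnt + 1 else cnt) acc
      = f.foldl (fun total fi => if pvCondB fi then total + 1 else total) acc := by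
  induction f with
  | nil => intro acc; rfl
  | cons fi rest ih =>
    intro acc
    simp only [List.foldl_cons, pv_cond_eq fi]
    exact ih _

-- ===== VERDICT (by name: the statement is the Claim_ definition above) =====
theorem nice_cnt_spec : Claim_equal_nice_cnt := by
  intro f _
  unfold Spec_nice_cnt
  rw [pv_nice_cnt_eq, pv_nice_cnt_alt_eq]
  exact pv_fold_eq f 0
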